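-- pv_equiv track=rewrite | github.com/AyushAgnihotri2025/CP-Solutions | GeeksforGeeks/Python3/Medium/Prefix Suffix String/prefix-suffix-string.py | prefixSuffixString
-- ===== SOURCE A (Python) =====
-- def prefixSuffixString(s1, s2) -> int:
--     #code here
--     count=0
--     suffix=set()
--     for i in range(len(s1)):
--         for j in range(1,len(s1[i])):
--             suffix.add(s1[i][j:])
--
--     prefix=set()
--     for i in range(len(s1)):
--         for j in range(1,len(s1[i])):
--             prefix.add(s1[i][:j])
--
--     for s in s2:
--         if s in suffix or s in prefix:
--             count+=1
--
--     return count
-- ===== SOURCE B (Python) =====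
-- def prefixSuffixString(s1, s2) -> int:
--     # For each query, scan the words directly: s counts iff it is a nonempty
--     # proper prefix or proper suffix of some word (no substring sets are built).
--     count = 0
--     for s in s2:
--         if s and any(len(w) > len(s) and (w.startswith(s) or w.endswith(s)) for w in s1):
--             count += 1
--     return count
-- ===== Notes on version B (the rewrite author's own statement) =====
-- stated objective: alternative
-- what changed: Instead of materialising the set of all proper prefixes and all proper suffixes of every word (quadratic in word length) and testing queries against those sets, B answers each query by scanning the words directly with startswith/endswith on strictly longer words.
import Mathlib
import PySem

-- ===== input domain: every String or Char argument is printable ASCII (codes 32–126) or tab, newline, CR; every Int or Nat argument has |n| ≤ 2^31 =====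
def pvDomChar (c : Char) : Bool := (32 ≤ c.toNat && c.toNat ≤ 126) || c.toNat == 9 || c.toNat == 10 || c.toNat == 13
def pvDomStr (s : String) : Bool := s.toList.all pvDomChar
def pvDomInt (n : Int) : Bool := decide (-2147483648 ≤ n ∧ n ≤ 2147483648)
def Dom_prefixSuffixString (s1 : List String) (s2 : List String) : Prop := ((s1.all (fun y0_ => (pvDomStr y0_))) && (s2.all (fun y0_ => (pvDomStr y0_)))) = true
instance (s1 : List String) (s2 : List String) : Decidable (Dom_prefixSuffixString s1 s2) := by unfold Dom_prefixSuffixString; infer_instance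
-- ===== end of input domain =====

-- B replaces A's quadratic substring sets by a direct startswith/endswith scan of the words per query (alternative algorithm, no speed claim).

-- ===== PORT A =====
-- A's 'suffix' set: all s1[i][j:] for j in range(1, len(s1[i]))
def pvSufSet (s1 : List String) : PySem.Set String :=
  (PySem.List.pyRange 0 (PySem.List.len s1)).foldl
    (fun acc i =>
      (PySem.List.pyRange 1 (PySem.Str.len (PySem.List.pyGetD s1 i ""))).foldl
        (fun st j => PySem.Set.add st (PySem.Str.slice (PySem.List.pyGetD s1 i "") (some j) none)) acc)
    PySem.Set.empty

-- A's 'prefix' set: all s1[i][:j] for j in range(1, len(s1[i]))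
def pvPreSet (s1 : List String) : PySem.Set String :=
  (PySem.List.pyRange 0 (PySem.List.len s1)).foldl
    (fun acc i =>
      (PySem.List.pyRange 1 (PySem.Str.len (PySem.List.pyGetD s1 i ""))).foldl
        (fun st j => PySem.Set.add st (PySem.Str.slice (PySem.List.pyGetD s1 i "") none (some j))) acc)
    PySem.Set.empty

def prefixSuffixString (s1 : List String) (s2 : List String) : Int :=
  s2.foldl
    (fun count s =>
      if PySem.Set.contains (pvSufSet s1) s || PySem.Set.contains (pvPreSet s1) s then count + 1
      else count)
    0

-- ===== PORT B =====
def prefixSuffixString_alt (s1 : List String) (s2 : List String) : Int :=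
  ((s2.countP (fun s =>
      !(s == "") &&
      s1.any (fun w =>
        decide (PySem.Str.len s < PySem.Str.len w) &&
        (PySem.Str.startswith w s || PySem.Str.endswith w s)))) : Int)

-- ===== PRECONDITION & SPEC =====
def Spec_prefixSuffixString (s1 : List String) (s2 : List String) (out : Int) : Prop := out = prefixSuffixString_alt s1 s2
instance (s1 : List String) (s2 : List String) (out : Int) : Decidable (Spec_prefixSuffixString s1 s2 out) := by unfold Spec_prefixSuffixString; infer_instance

-- ===== CLAIM (what is proved, stated in full; the proofs are below) =====
def Claim_equal_prefixSuffixString : Prop := ∀ (s1 : List String) (s2 : List String), Dom_prefixSuffixString s1 s2 → Spec_prefixSuffixString s1 s2 (prefixSuffixString s1 s2)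

-- ===== LEMMAS AND PROOFS =====

-- membership in a fold of Set.add's
theorem pv_mem_foldl_add {α β : Type} [BEq β] [LawfulBEq β] (f : α → β) (l : List α)
    (acc : PySem.Set β) (x : β) :
    x ∈ l.foldl (fun s j => PySem.Set.add s (f j)) acc ↔ x ∈ acc ∨ ∃ j ∈ l, x = f j := by
  induction l generalizing acc with
  | nil => simp
  | cons h t ih =>
    simp only [List.foldl_cons, ih, PySem.Set.mem_add, List.mem_cons]
    constructor
    · rintro ((h1 | h1) | ⟨j, hj, rfl⟩)
      · exact Or.inl h1
      · exact Or.inr ⟨h, Or.inl rfl, h1⟩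
      · exact Or.inr ⟨j, Or.inr hj, rfl⟩
    · rintro (h1 | ⟨j, (rfl | hj), rfl⟩)
      · exact Or.inl (Or.inl h1)
      · exact Or.inl (Or.inr rfl)
      · exact Or.inr ⟨j, hj, rfl⟩

theorem pv_mem_sufSet (s1 : List String) (x : String) :
    x ∈ pvSufSet s1 ↔
      ∃ w ∈ s1, ∃ j : Int, 1 ≤ j ∧ j < PySem.Str.len w ∧ x = PySem.Str.slice w (some j) none := by
  unfold pvSufSet
  rw [PySem.List.foldl_pyRange_pyGetD s1 ""
    (fun acc w => (PySem.List.pyRange 1 (PySem.Str.len w)).foldl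
      (fun st j => PySem.Set.add st (PySem.Str.slice w (some j) none)) acc)
    PySem.Set.empty (le_refl 0)]
  simp only [Int.toNat_zero, List.drop_zero]
  have H : ∀ acc : PySem.Set String,
      x ∈ s1.foldl (fun acc w => (PySem.List.pyRange 1 (PySem.Str.len w)).foldl
        (fun st j => PySem.Set.add st (PySem.Str.slice w (some j) none)) acc) acc ↔
      x ∈ acc ∨ ∃ w ∈ s1, ∃ j : Int, 1 ≤ j ∧ j < PySem.Str.len w ∧
        x = PySem.Str.slice w (some j) none := by
    induction s1 with
    | nil => simp
    | cons w t ih =>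
      intro acc
      simp only [List.foldl_cons, ih, pv_mem_foldl_add, PySem.List.mem_pyRange_one,
        List.mem_cons]
      constructor
      · rintro ((h1 | ⟨j, ⟨hj1, hj2⟩, rfl⟩) | ⟨v, hv, hrest⟩)
        · exact Or.inl h1
        · exact Or.inr ⟨w, Or.inl rfl, j, hj1, hj2, rfl⟩
        · exact Or.inr ⟨v, Or.inr hv, hrest⟩
      · rintro (h1 | ⟨v, (rfl | hv), j, hj1, hj2, rfl⟩)
        · exact Or.inl (Or.inl h1)
        · exact Or.inl (Or.inr ⟨j, ⟨hj1, hj2⟩, rfl⟩)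
        · exact Or.inr ⟨v, hv, j, hj1, hj2, rfl⟩
  simpa [PySem.Set.empty] using H PySem.Set.empty

theorem pv_mem_preSet (s1 : List String) (x : String) :
    x ∈ pvPreSet s1 ↔
      ∃ w ∈ s1, ∃ j : Int, 1 ≤ j ∧ j < PySem.Str.len w ∧ x = PySem.Str.slice w none (some j) := by
  unfold pvPreSet
  rw [PySem.List.foldl_pyRange_pyGetD s1 ""
    (fun acc w => (PySem.List.pyRange 1 (PySem.Str.len w)).foldl
      (fun st j => PySem.Set.add st (PySem.Str.slice w none (some j))) acc)
    PySem.Set.empty (le_refl 0)]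
  simp only [Int.toNat_zero, List.drop_zero]
  have H : ∀ acc : PySem.Set String,
      x ∈ s1.foldl (fun acc w => (PySem.List.pyRange 1 (PySem.Str.len w)).foldl
        (fun st j => PySem.Set.add st (PySem.Str.slice w none (some j))) acc) acc ↔
      x ∈ acc ∨ ∃ w ∈ s1, ∃ j : Int, 1 ≤ j ∧ j < PySem.Str.len w ∧
        x = PySem.Str.slice w none (some j) := by
    induction s1 with
    | nil => simp
    | cons w t ih =>
      intro acc
      simp only [List.foldl_cons, ih, pv_mem_foldl_add, PySem.List.mem_pyRange_one,
        List.mem_cons]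
      constructor
      · rintro ((h1 | ⟨j, ⟨hj1, hj2⟩, rfl⟩) | ⟨v, hv, hrest⟩)
        · exact Or.inl h1
        · exact Or.inr ⟨w, Or.inl rfl, j, hj1, hj2, rfl⟩
        · exact Or.inr ⟨v, Or.inr hv, hrest⟩
      · rintro (h1 | ⟨v, (rfl | hv), j, hj1, hj2, rfl⟩)
        · exact Or.inl (Or.inl h1)
        · exact Or.inl (Or.inr ⟨j, ⟨hj1, hj2⟩, rfl⟩)
        · exact Or.inr ⟨v, hv, j, hj1, hj2, rfl⟩
  simpa [PySem.Set.empty] using H PySem.Set.empty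

-- x is such a slice iff x is a nonempty proper suffix of w
theorem pv_suffix_char (w x : String) :
    (∃ j : Int, 1 ≤ j ∧ j < PySem.Str.len w ∧ x = PySem.Str.slice w (some j) none) ↔
      (x.toList ≠ [] ∧ x.toList.length < w.toList.length ∧ x.toList <:+ w.toList) := by
  rw [PySem.Str.len_eq]
  constructor
  · rintro ⟨j, hj1, hj2, rfl⟩
    have hj0 : (0 : Int) ≤ j := by omega
    have hslice : (PySem.Str.slice w (some j) none).toList = w.toList.drop j.toNat := by
      simp [PySem.Str.slice, PySem.Chars.slice, PySem.List.slice_from _ hj0]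
    have hjn : j.toNat < w.toList.length := by omega
    have hj1' : 1 ≤ j.toNat := by omega
    refine ⟨?_, ?_, ?_⟩
    · apply List.ne_nil_of_length_pos; rw [hslice, List.length_drop]; omega
    · rw [hslice, List.length_drop]; omega
    · rw [hslice]; exact List.drop_suffix _ _
  · rintro ⟨hne, hlt, t, ht⟩
    have hlen : t.length + x.toList.length = w.toList.length := by
      have := congrArg List.length ht; simpa using this
    have hx1 : 1 ≤ x.toList.length := by
      cases hx : x.toList with
      | nil => exact absurd hx hne
      | cons a l => simp
    refine ⟨(t.length : Int), by omega, by omega, ?_⟩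
    rw [← String.toList_inj]
    have hslice : (PySem.Str.slice w (some (t.length : Int)) none).toList
        = w.toList.drop t.length := by
      simp [PySem.Str.slice, PySem.Chars.slice,
        PySem.List.slice_from _ (Int.natCast_nonneg t.length)]
    rw [hslice, ← ht, List.drop_left]

theorem pv_prefix_char (w x : String) :
    (∃ j : Int, 1 ≤ j ∧ j < PySem.Str.len w ∧ x = PySem.Str.slice w none (some j)) ↔
      (x.toList ≠ [] ∧ x.toList.length < w.toList.length ∧ x.toList <+: w.toList) := by
  rw [PySem.Str.len_eq]
  constructor
  · rintro ⟨j, hj1, hj2, rfl⟩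
    have hj0 : (0 : Int) ≤ j := by omega
    have hslice : (PySem.Str.slice w none (some j)).toList = w.toList.take j.toNat := by
      simp [PySem.Str.slice, PySem.Chars.slice, PySem.List.slice_to _ hj0]
    have hjn : j.toNat < w.toList.length := by omega
    have hj1' : 1 ≤ j.toNat := by omega
    refine ⟨?_, ?_, ?_⟩
    · apply List.ne_nil_of_length_pos; rw [hslice, List.length_take]; omega
    · rw [hslice, List.length_take]; omega
    · rw [hslice]; exact List.take_prefix _ _
  · rintro ⟨hne, hlt, t, ht⟩
    have hlen : x.toList.length + t.length = w.toList.length := by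
      have := congrArg List.length ht; simpa using this
    have hx1 : 1 ≤ x.toList.length := by
      cases hx : x.toList with
      | nil => exact absurd hx hne
      | cons a l => simp
    refine ⟨(x.toList.length : Int), by omega, by omega, ?_⟩
    rw [← String.toList_inj]
    have hslice : (PySem.Str.slice w none (some (x.toList.length : Int))).toList
        = w.toList.take x.toList.length := by
      simp [PySem.Str.slice, PySem.Chars.slice]
    rw [hslice, ← ht, List.take_left]

-- the two per-query predicates agree
theorem pv_pred_eq (s1 : List String) (s : String) :
    (PySem.Set.contains (pvSufSet s1) s || PySem.Set.contains (pvPreSet s1) s) =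
      (!(s == "") &&
        s1.any (fun w =>
          decide (PySem.Str.len s < PySem.Str.len w) &&
          (PySem.Str.startswith w s || PySem.Str.endswith w s))) := by
  have hcs : ((pvSufSet s1).contains s = true) ↔ s ∈ pvSufSet s1 := by
    simp [PySem.Set.contains]
  have hcp : ((pvPreSet s1).contains s = true) ↔ s ∈ pvPreSet s1 := by
    simp [PySem.Set.contains]
  have hes : (s = "") ↔ s.toList = [] := by
    constructor
    · rintro rfl; rfl
    · intro h; rw [← String.toList_inj]; simpa using h
  rw [Bool.eq_iff_iff, Bool.or_eq_true, Bool.and_eq_true, hcs, hcp,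
    pv_mem_sufSet, pv_mem_preSet]
  simp only [pv_suffix_char, pv_prefix_char]
  simp only [Bool.not_eq_true', beq_eq_false_iff_ne,
    List.any_eq_true, Bool.and_eq_true, Bool.or_eq_true, decide_eq_true_eq,
    PySem.Str.startswith_eq, PySem.Str.endswith_eq, PySem.Chars.startswith_iff,
    PySem.Chars.endswith_iff, PySem.Str.len_eq, Nat.cast_lt, ne_eq]
  constructor
  · rintro (⟨w, hw, hne, hlt, hm⟩ | ⟨w, hw, hne, hlt, hm⟩)
    · exact ⟨fun h => hne (hes.mp h), w, hw, hlt, Or.inr hm⟩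
    · exact ⟨fun h => hne (hes.mp h), w, hw, hlt, Or.inl hm⟩
  · rintro ⟨hne, w, hw, hlt, (hm | hm)⟩
    · exact Or.inr ⟨w, hw, fun h => hne (hes.mpr h), hlt, hm⟩
    · exact Or.inl ⟨w, hw, fun h => hne (hes.mpr h), hlt, hm⟩

-- ===== VERDICT (by name: the statement is the Claim_ definition above) =====
theorem prefixSuffixString_spec : Claim_equal_prefixSuffixString := by
  intro s1 s2 _
  unfold Spec_prefixSuffixString prefixSuffixString prefixSuffixString_alt
  rw [PySem.List.foldl_count_if]
  rw [List.countP_congr (fun s _ => by rw [pv_pred_eq s1 s])]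
  simp
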